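-- pv_equiv track=rewrite | github.com/nalsakas/algorithms-python | graph algoritms/islandCount.py | islandCount
-- ===== SOURCE A (Python) =====
-- island_grid = [
--     ['W', 'L', 'W', 'W', 'W'],
--     ['W', 'L', 'W', 'W', 'W'],
--     ['W', 'W', 'W', 'L', 'W'],
--     ['W', 'W', 'L', 'L', 'L'],
--     ['L', 'L', 'W', 'L', 'W']
-- ]
--
-- def islandCount(grid):
--     count = 0
--     rowLength = len(island_grid)
--     columnLength = len(island_grid[0])
--     visited = set()
--     largest = 0
--
--     for r in range(rowLength):
--         for c in range(columnLength):
--             size = explore(grid, r, c, visited)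
--             if size != 0: count += 1
--             if size > largest: largest = size
--
--     return count, largest
--
-- def explore(grid, r, c, visited):
--     if r < 0 or r > len(grid) - 1: return 0
--     if c < 0 or c > len(grid[0]) - 1: return 0
--
--     node = grid[r][c]
--     if node == 'W': return 0
--     if f"${r}${c}" in visited: return 0
--     visited.add(f"${r}${c}")
--     sum = 1
--
--     sum += explore(grid, r + 1, c, visited)
--     sum += explore(grid, r, c + 1, visited)
--     sum += explore(grid, r - 1, c, visited)
--     sum += explore(grid, r, c - 1, visited)
--
--     return sum
-- ===== SOURCE B (Python) =====
-- island_grid = [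
--     ['W', 'L', 'W', 'W', 'W'],
--     ['W', 'L', 'W', 'W', 'W'],
--     ['W', 'W', 'W', 'L', 'W'],
--     ['W', 'W', 'L', 'L', 'L'],
--     ['L', 'L', 'W', 'L', 'W']
-- ]
--
-- def islandCount(grid):
--     seen = set()
--     count = 0
--     largest = 0
--     for r in range(len(island_grid)):
--         for c in range(len(island_grid[0])):
--             size = 0
--             stack = [(r, c)]
--             while stack:
--                 i, j = stack.pop()
--                 if (0 <= i < len(grid) and 0 <= j < len(grid[0])
--                         and grid[i][j] != 'W' and (i, j) not in seen):
--                     seen.add((i, j))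
--                     size += 1
--                     stack += [(i, j - 1), (i - 1, j), (i, j + 1), (i + 1, j)]
--             if size:
--                 count += 1
--             if size > largest:
--                 largest = size
--     return count, largest
-- ===== Notes on version B (the rewrite author's own statement) =====
-- stated objective: idiomatic
-- what changed: Replaces the four-way recursive flood fill keyed by formatted visit-strings with an iterative explicit-stack flood fill over (row, col) tuples, one combined validity test per popped cell; Pre_ excludes ragged grids (a row shorter than the first row), on which the unconditional grid[r][c] access generally raises IndexError.
-- outside the precondition, e.g. on islandCount([['W'], ['W'], ['W'], ['W'], ['W'], []]): A returns (0, 0), B returns (0, 0)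
import Mathlib
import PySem

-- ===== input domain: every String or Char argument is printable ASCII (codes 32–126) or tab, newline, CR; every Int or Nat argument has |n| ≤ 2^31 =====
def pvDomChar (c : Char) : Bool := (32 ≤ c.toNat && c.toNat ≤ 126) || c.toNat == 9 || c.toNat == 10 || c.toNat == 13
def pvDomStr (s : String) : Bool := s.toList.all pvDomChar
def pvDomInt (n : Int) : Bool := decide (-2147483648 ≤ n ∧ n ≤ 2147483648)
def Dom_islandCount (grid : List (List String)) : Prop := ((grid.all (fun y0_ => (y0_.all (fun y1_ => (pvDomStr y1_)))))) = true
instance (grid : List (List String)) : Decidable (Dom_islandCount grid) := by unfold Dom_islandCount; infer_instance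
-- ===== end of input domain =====

-- B replaces A's four-way recursive flood fill (string visited-keys) by an iterative
-- explicit-stack flood fill over (row,col) pairs; same cost, plainer control flow (objective: idiomatic).


-- ===== PORT A =====
-- module-level constant island_grid (shared context of both implementations)
def islandGrid : List (List String) :=
  [["W","L","W","W","W"],["W","L","W","W","W"],["W","W","W","L","W"],["W","W","L","L","L"],["L","L","W","L","W"]]

-- f"${r}${c}" modelled on the List Char side (exact: the Python string's characters)
def keyA (r c : Int) : List Char := '$' :: PySem.Int.toChars r ++ '$' :: PySem.Int.toChars c

-- fuel bound for the recursions/loops below (ample: one unit per Python call/pop; my artifact, not Python's)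
def pvFuel (g : List (List String)) : Nat := 4 * g.length * (g.headD []).length + 5

-- explore(grid, r, c, visited): literal recursion.  Fuel plumbing (my artifact, not Python's):
-- `fuel` is a global budget, one unit per call — exactly one unit per stack pop in B's loop —
-- threaded through and returned; `d` is a structural depth bound that only makes the recursion
-- structural (d = fuel at the call site, and depth ≤ consumed fuel, so d never runs out first).
def exploreF (g : List (List String)) : (d : Nat) → Nat → Int → Int → PySem.Set (List Char) →
    Int × PySem.Set (List Char) × Nat
  | 0, _, _, _, v => (0, v, 0)
  | _+1, 0, _, _, v => (0, v, 0)
  | d+1, fl+1, r, c, v =>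
    if r < 0 ∨ (g.length : Int) - 1 < r then (0, v, fl)
    else if c < 0 ∨ ((g.headD []).length : Int) - 1 < c then (0, v, fl)
    -- grid[r][c]: in range here (Python would have raised earlier on ragged rows → Pre_)
    else if PySem.List.pyGetD (PySem.List.pyGetD g r []) c "" = "W" then (0, v, fl)
    else if PySem.Set.contains v (keyA r c) then (0, v, fl)
    else
      let v1 := PySem.Set.add v (keyA r c)
      let o1 := exploreF g d fl (r+1) c v1
      let o2 := exploreF g d o1.2.2 r (c+1) o1.2.1
      let o3 := exploreF g d o2.2.2 (r-1) c o2.2.1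
      let o4 := exploreF g d o3.2.2 r (c-1) o3.2.1
      (1 + o1.1 + o2.1 + o3.1 + o4.1, o4.2.1, o4.2.2)

def islandCount (grid : List (List String)) : Int × Int :=
  let rowLength : Int := (islandGrid.length : Int)
  let columnLength : Int := ((islandGrid.headD []).length : Int)
  let st :=
    (PySem.List.pyRange 0 rowLength 1).foldl (fun st r =>
      (PySem.List.pyRange 0 columnLength 1).foldl (fun st c =>
        let o := exploreF grid (pvFuel grid) (pvFuel grid) r c st.2.1
        ((if o.1 ≠ 0 then st.1 + 1 else st.1), o.2.1, if o.1 > st.2.2 then o.1 else st.2.2)) st)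
      ((0 : Int), ([] : PySem.Set (List Char)), (0 : Int))
  (st.1, st.2.2)

-- ===== PORT B =====
-- the while-stack loop of Source B; head of the list = top of the Python stack (list end), so the
-- push order (i,j-1),(i-1,j),(i,j+1),(i+1,j) becomes the cons chain below; fuel = one unit per pop
def stackLoop (g : List (List String)) : Nat → List (Int × Int) → PySem.Set (Int × Int) → Int →
    Int × PySem.Set (Int × Int)
  | 0, _, s, acc => (acc, s)
  | _+1, [], s, acc => (acc, s)
  | f+1, (i,j) :: st, s, acc =>
    if 0 ≤ i ∧ i < (g.length : Int) ∧ 0 ≤ j ∧ j < ((g.headD []).length : Int) ∧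
        PySem.List.pyGetD (PySem.List.pyGetD g i []) j "" ≠ "W" ∧
        PySem.Set.contains s (i, j) = false then
      stackLoop g f ((i+1,j) :: (i,j+1) :: (i-1,j) :: (i,j-1) :: st) (PySem.Set.add s (i,j)) (acc+1)
    else
      stackLoop g f st s acc

def islandCount_alt (grid : List (List String)) : Int × Int :=
  let st :=
    (PySem.List.pyRange 0 (islandGrid.length : Int) 1).foldl (fun st r =>
      (PySem.List.pyRange 0 ((islandGrid.headD []).length : Int) 1).foldl (fun st c =>
        let o := stackLoop grid (pvFuel grid) [(r, c)] st.2.1 0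
        ((if o.1 ≠ 0 then st.1 + 1 else st.1), o.2, if o.1 > st.2.2 then o.1 else st.2.2)) st)
      ((0 : Int), ([] : PySem.Set (Int × Int)), (0 : Int))
  (st.1, st.2.2)

-- ===== PRECONDITION & SPEC =====
-- Pre_ excludes grids having a row shorter than the first row: there the unconditional
-- grid[r][c] access of both programs generally raises IndexError (it can return, e.g. when the
-- short row is never reached — see the cite in claim.json; B returns the same value there).
def Pre_islandCount (grid : List (List String)) : Prop :=
  ∀ row ∈ grid, (grid.headD []).length ≤ row.length
instance (grid : List (List String)) : Decidable (Pre_islandCount grid) := by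
  unfold Pre_islandCount; infer_instance
def pvWitness_islandCount : List (List String) := [["L","W"],["W","L"]]
def Spec_islandCount (grid : List (List String)) (out : Int × Int) : Prop := out = islandCount_alt grid
instance (grid : List (List String)) (out : Int × Int) : Decidable (Spec_islandCount grid out) := by
  unfold Spec_islandCount; infer_instance

-- ===== CLAIM (what is proved, stated in full; the proofs are below) =====
def Claim_equal_islandCount : Prop := ∀ (grid : List (List String)), Dom_islandCount grid → Pre_islandCount grid → Spec_islandCount grid (islandCount grid)

-- ===== LEMMAS AND PROOFS =====

lemma pvDollarSplit : ∀ (a a' b b' : List Char), '$' ∉ a → '$' ∉ a' →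
    a ++ '$' :: b = a' ++ '$' :: b' → a = a' ∧ b = b' := by
  intro a
  induction a with
  | nil =>
    intro a' b b' _ ha' h
    cases a' with
    | nil => simpa using h
    | cons x xs =>
      simp at h
      have hm : ('$' : Char) ∈ x :: xs := by rw [h.1]; exact List.mem_cons_self
      exact absurd hm ha'
  | cons x xs ih =>
    intro a' b b' ha ha' h
    cases a' with
    | nil =>
      simp at h
      have hm : ('$' : Char) ∈ x :: xs := by rw [← h.1]; exact List.mem_cons_self
      exact absurd hm ha
    | cons y ys =>
      simp at h
      obtain ⟨rfl, h2⟩ := h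
      have := ih ys b b' (fun hm => ha (List.mem_cons_of_mem _ hm))
        (fun hm => ha' (List.mem_cons_of_mem _ hm)) h2
      exact ⟨by rw [this.1], this.2⟩

lemma pvToDigitsCore10 : ∀ (f n : Nat) (ds : List Char), 0 < n → n < 10 ^ f →
    Nat.toDigitsCore 10 f n ds = ((Nat.digits 10 n).map Nat.digitChar).reverse ++ ds := by
  intro f
  induction f with
  | zero => intro n ds hn hf; simp at hf; omega
  | succ f ih =>
    intro n ds hn hf
    rw [Nat.toDigitsCore]
    rw [Nat.digits_def' (by norm_num : 1 < 10) hn]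
    by_cases h : n / 10 = 0
    · have hlt : n < 10 := by omega
      simp only [h]
      simp [Nat.mod_eq_of_lt hlt]
    · have hdiv : n / 10 < 10 ^ f := by
        rw [Nat.div_lt_iff_lt_mul (by norm_num : 0 < 10)]
        calc n < 10 ^ (f+1) := hf
        _ = 10 ^ f * 10 := by ring
      simp only [if_neg h]
      rw [ih (n / 10) _ (Nat.pos_of_ne_zero h) hdiv]
      simp

lemma pvToDigits10 (n : Nat) (hn : 0 < n) :
    Nat.toDigits 10 n = ((Nat.digits 10 n).map Nat.digitChar).reverse := by
  have h10 : n < 10 ^ (n + 1) := by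
    calc n < 2 ^ n := Nat.lt_two_pow_self
    _ ≤ 10 ^ n := Nat.pow_le_pow_left (by norm_num) n
    _ ≤ 10 ^ (n+1) := Nat.pow_le_pow_right (by norm_num) (Nat.le_succ n)
  rw [Nat.toDigits, pvToDigitsCore10 (n+1) n [] hn h10, List.append_nil]

lemma pvDigitCharDigit (d : Nat) (h : d < 10) : Nat.digitChar d ∈ (['0','1','2','3','4','5','6','7','8','9'] : List Char) := by
  interval_cases d <;> decide

lemma pvNoDollar (n : Nat) : ('$' : Char) ∉ Nat.toDigits 10 n := by
  rcases Nat.eq_zero_or_pos n with rfl | hn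
  · decide
  · rw [pvToDigits10 n hn]
    intro hm
    simp only [List.mem_reverse, List.mem_map] at hm
    obtain ⟨d, hd, hdc⟩ := hm
    have := pvDigitCharDigit d (Nat.digits_lt_base (by norm_num) hd)
    rw [hdc] at this
    simp at this

lemma pvMapDigitCharInj : ∀ (l1 l2 : List Nat), (∀ d ∈ l1, d < 10) → (∀ d ∈ l2, d < 10) →
    l1.map Nat.digitChar = l2.map Nat.digitChar → l1 = l2 := by
  intro l1
  induction l1 with
  | nil => intro l2 _ _ h; cases l2 <;> simp_all
  | cons a as ih =>
    intro l2 h1 h2 h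
    cases l2 with
    | nil => simp at h
    | cons b bs =>
      simp only [List.map_cons, List.cons.injEq] at h
      have ha : a < 10 := h1 a List.mem_cons_self
      have hb : b < 10 := h2 b List.mem_cons_self
      have h1' := h.1
      have hab : a = b := by
        interval_cases a <;> interval_cases b <;> first | rfl | (exact absurd h1' (by decide))
      have := ih bs (fun d hd => h1 d (List.mem_cons_of_mem _ hd))
        (fun d hd => h2 d (List.mem_cons_of_mem _ hd)) h.2
      rw [hab, this]

lemma pvToDigits10Inj (m n : Nat) (h : Nat.toDigits 10 m = Nat.toDigits 10 n) : m = n := by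
  rcases Nat.eq_zero_or_pos m with rfl | hm <;> rcases Nat.eq_zero_or_pos n with rfl | hn
  · rfl
  · exfalso
    rw [pvToDigits10 n hn] at h
    have h0 : Nat.toDigits 10 0 = ['0'] := by decide
    rw [h0] at h
    have : (Nat.digits 10 n).map Nat.digitChar = ['0'] := by
      have := congrArg List.reverse h
      simpa using this.symm
    have hd : Nat.digits 10 n = [0] := by
      cases hdig : Nat.digits 10 n with
      | nil => rw [hdig] at this; simp at this
      | cons d ds =>
        rw [hdig] at this
        cases ds with
        | nil =>
          simp only [List.map_cons, List.map_nil, List.cons.injEq] at this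
          have hdlt : d < 10 := Nat.digits_lt_base (by norm_num) (by rw [hdig]; exact List.mem_cons_self)
          have h1' := this.1
          have : d = 0 := by
            interval_cases d <;> first | rfl | (exact absurd h1' (by decide))
          rw [this]
        | cons e es => simp at this
    have : n = 0 := by
      have := Nat.ofDigits_digits 10 n
      rw [hd] at this
      simpa using this.symm
    omega
  · exfalso
    rw [pvToDigits10 m hm] at h
    have h0 : Nat.toDigits 10 0 = ['0'] := by decide
    rw [h0] at h
    have : (Nat.digits 10 m).map Nat.digitChar = ['0'] := by
      have := congrArg List.reverse h
      simpa using this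
    have hd : Nat.digits 10 m = [0] := by
      cases hdig : Nat.digits 10 m with
      | nil => rw [hdig] at this; simp at this
      | cons d ds =>
        rw [hdig] at this
        cases ds with
        | nil =>
          simp only [List.map_cons, List.map_nil, List.cons.injEq] at this
          have hdlt : d < 10 := Nat.digits_lt_base (by norm_num) (by rw [hdig]; exact List.mem_cons_self)
          have h1' := this.1
          have : d = 0 := by
            interval_cases d <;> first | rfl | (exact absurd h1' (by decide))
          rw [this]
        | cons e es => simp at this
    have : m = 0 := by
      have := Nat.ofDigits_digits 10 m
      rw [hd] at this
      simpa using this.symm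
    omega
  · rw [pvToDigits10 m hm, pvToDigits10 n hn] at h
    have := List.reverse_injective h
    have := pvMapDigitCharInj _ _
      (fun d hd => Nat.digits_lt_base (by norm_num) hd)
      (fun d hd => Nat.digits_lt_base (by norm_num) hd) this
    have := congrArg (Nat.ofDigits 10) this
    rwa [Nat.ofDigits_digits, Nat.ofDigits_digits] at this

lemma pvToCharsNonneg (n : Int) (h : 0 ≤ n) : PySem.Int.toChars n = Nat.toDigits 10 n.toNat := by
  simp [PySem.Int.toChars, not_lt.mpr h]

lemma pvKeyAInj (r c r' c' : Int) (hr : 0 ≤ r) (hc : 0 ≤ c) (hr' : 0 ≤ r') (hc' : 0 ≤ c')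
    (h : keyA r c = keyA r' c') : r = r' ∧ c = c' := by
  unfold keyA at h
  rw [pvToCharsNonneg r hr, pvToCharsNonneg c hc, pvToCharsNonneg r' hr',
    pvToCharsNonneg c' hc'] at h
  injection h with h0 h2
  have := pvDollarSplit _ _ _ _ (pvNoDollar r.toNat) (pvNoDollar r'.toNat) h2
  have h1 := pvToDigits10Inj _ _ this.1
  have h2 := pvToDigits10Inj _ _ this.2
  omega

def RelVS (v : PySem.Set (List Char)) (s : PySem.Set (Int × Int)) : Prop :=
  (∀ p ∈ s, 0 ≤ p.1 ∧ 0 ≤ p.2) ∧ v = s.map (fun p => keyA p.1 p.2)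

lemma pvContainsBridge (v : PySem.Set (List Char)) (s : PySem.Set (Int × Int)) (r c : Int)
    (hrel : RelVS v s) (hr : 0 ≤ r) (hc : 0 ≤ c) :
    PySem.Set.contains v (keyA r c) = PySem.Set.contains s (r, c) := by
  obtain ⟨hs, rfl⟩ := hrel
  simp only [PySem.Set.contains]
  by_cases hm : (r, c) ∈ s
  · have : keyA r c ∈ s.map (fun p => keyA p.1 p.2) := by
      exact List.mem_map_of_mem hm
    simp [this, hm]
  · have : keyA r c ∉ s.map (fun p => keyA p.1 p.2) := by
      intro hk
      simp only [List.mem_map] at hk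
      obtain ⟨⟨a, b⟩, hab, hkab⟩ := hk
      obtain ⟨ha, hb⟩ := hs _ hab
      obtain ⟨h1, h2⟩ := pvKeyAInj a b r c ha hb hr hc hkab
      exact hm (by rwa [← h1, ← h2])
    simp [this, hm]

lemma pvRelAdd (v : PySem.Set (List Char)) (s : PySem.Set (Int × Int)) (r c : Int)
    (hrel : RelVS v s) (hr : 0 ≤ r) (hc : 0 ≤ c) :
    RelVS (PySem.Set.add v (keyA r c)) (PySem.Set.add s (r, c)) := by
  have hbr := pvContainsBridge v s r c hrel hr hc
  obtain ⟨hs, rfl⟩ := hrel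
  simp only [PySem.Set.add, hbr]
  by_cases hm : PySem.Set.contains s (r, c) = true
  · simp only [hm, if_true]
    exact ⟨hs, rfl⟩
  · simp only [hm, if_false, Bool.false_eq_true]
    refine ⟨?_, by simp⟩
    intro p hp
    rcases List.mem_append.mp hp with h | h
    · exact hs p h
    · simp at h
      rw [h]
      exact ⟨hr, hc⟩

lemma exF_d0 (g : List (List String)) (fuel : Nat) (r c : Int) (v : PySem.Set (List Char)) :
    exploreF g 0 fuel r c v = (0, v, 0) := by
  rw [exploreF]

lemma exF_f0 (g : List (List String)) (d : Nat) (r c : Int) (v : PySem.Set (List Char)) :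
    exploreF g (d+1) 0 r c v = (0, v, 0) := by
  rw [exploreF]

lemma exF_exit (g : List (List String)) (d fl : Nat) (r c : Int) (v : PySem.Set (List Char))
    (h : (r < 0 ∨ (g.length : Int) - 1 < r) ∨ (c < 0 ∨ ((g.headD []).length : Int) - 1 < c) ∨
      PySem.List.pyGetD (PySem.List.pyGetD g r []) c "" = "W" ∨
      PySem.Set.contains v (keyA r c) = true) :
    exploreF g (d+1) (fl+1) r c v = (0, v, fl) := by
  rw [exploreF]
  split_ifs with a b c' e
  · rfl
  · rfl
  · rfl
  · rfl
  · tauto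

lemma exF_visit (g : List (List String)) (d fl : Nat) (r c : Int) (v : PySem.Set (List Char))
    (h1 : ¬(r < 0 ∨ (g.length : Int) - 1 < r))
    (h2 : ¬(c < 0 ∨ ((g.headD []).length : Int) - 1 < c))
    (h3 : ¬(PySem.List.pyGetD (PySem.List.pyGetD g r []) c "" = "W"))
    (h4 : ¬(PySem.Set.contains v (keyA r c) = true))
    {o1 o2 o3 o4 : Int × PySem.Set (List Char) × Nat}
    (ho1 : o1 = exploreF g d fl (r+1) c (PySem.Set.add v (keyA r c)))
    (ho2 : o2 = exploreF g d o1.2.2 r (c+1) o1.2.1)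
    (ho3 : o3 = exploreF g d o2.2.2 (r-1) c o2.2.1)
    (ho4 : o4 = exploreF g d o3.2.2 r (c-1) o3.2.1) :
    exploreF g (d+1) (fl+1) r c v = (1 + o1.1 + o2.1 + o3.1 + o4.1, o4.2.1, o4.2.2) := by
  subst ho1 ho2 ho3 ho4
  rw [exploreF]
  rw [if_neg h1, if_neg h2, if_neg h3, if_neg h4]

lemma pvExploreFuelLe (g : List (List String)) :
    ∀ (d fuel : Nat) (r c : Int) (v : PySem.Set (List Char)),
      (exploreF g d fuel r c v).2.2 ≤ fuel := by
  intro d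
  induction d with
  | zero => intro fuel r c v; rw [exF_d0]; exact Nat.zero_le fuel
  | succ d ih =>
    intro fuel r c v
    cases fuel with
    | zero => rw [exF_f0]
    | succ fl =>
      by_cases h1 : r < 0 ∨ (g.length : Int) - 1 < r
      · rw [exF_exit g d fl r c v (Or.inl h1)]; exact Nat.le_succ fl
      · by_cases h2 : c < 0 ∨ ((g.headD []).length : Int) - 1 < c
        · rw [exF_exit g d fl r c v (Or.inr (Or.inl h2))]; exact Nat.le_succ fl
        · by_cases h3 : PySem.List.pyGetD (PySem.List.pyGetD g r []) c "" = "W"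
          · rw [exF_exit g d fl r c v (Or.inr (Or.inr (Or.inl h3)))]; exact Nat.le_succ fl
          · by_cases h4 : PySem.Set.contains v (keyA r c) = true
            · rw [exF_exit g d fl r c v (Or.inr (Or.inr (Or.inr h4)))]; exact Nat.le_succ fl
            · rw [exF_visit g d fl r c v h1 h2 h3 h4 rfl rfl rfl rfl]
              set v1 := PySem.Set.add v (keyA r c) with hv1
              have i1 := ih fl (r+1) c v1
              set o1 := exploreF g d fl (r+1) c v1 with ho1
              have i2 := ih o1.2.2 r (c+1) o1.2.1
              set o2 := exploreF g d o1.2.2 r (c+1) o1.2.1 with ho2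
              have i3 := ih o2.2.2 (r-1) c o2.2.1
              set o3 := exploreF g d o2.2.2 (r-1) c o2.2.1 with ho3
              have i4 := ih o3.2.2 r (c-1) o3.2.1
              set o4 := exploreF g d o3.2.2 r (c-1) o3.2.1 with ho4
              show o4.2.2 ≤ fl + 1
              omega

lemma slNil (g : List (List String)) (f : Nat) (s : PySem.Set (Int × Int)) (acc : Int) :
    stackLoop g f [] s acc = (acc, s) := by
  cases f <;> rw [stackLoop]

lemma sl0 (g : List (List String)) (st : List (Int × Int)) (s : PySem.Set (Int × Int)) (acc : Int) :
    stackLoop g 0 st s acc = (acc, s) := by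
  rw [stackLoop]

lemma slSkip (g : List (List String)) (f : Nat) (i j : Int) (st : List (Int × Int))
    (s : PySem.Set (Int × Int)) (acc : Int)
    (h : ¬(0 ≤ i ∧ i < (g.length : Int) ∧ 0 ≤ j ∧ j < ((g.headD []).length : Int) ∧
      PySem.List.pyGetD (PySem.List.pyGetD g i []) j "" ≠ "W" ∧
      PySem.Set.contains s (i, j) = false)) :
    stackLoop g (f+1) ((i, j) :: st) s acc = stackLoop g f st s acc := by
  rw [stackLoop]
  rw [if_neg h]

lemma slVisit (g : List (List String)) (f : Nat) (i j : Int) (st : List (Int × Int))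
    (s : PySem.Set (Int × Int)) (acc : Int)
    (h : 0 ≤ i ∧ i < (g.length : Int) ∧ 0 ≤ j ∧ j < ((g.headD []).length : Int) ∧
      PySem.List.pyGetD (PySem.List.pyGetD g i []) j "" ≠ "W" ∧
      PySem.Set.contains s (i, j) = false) :
    stackLoop g (f+1) ((i, j) :: st) s acc =
      stackLoop g f ((i+1, j) :: (i, j+1) :: (i-1, j) :: (i, j-1) :: st) (PySem.Set.add s (i, j)) (acc+1) := by
  rw [stackLoop]
  rw [if_pos h]

lemma pvSim (g : List (List String)) :
    ∀ (d fuel : Nat), fuel ≤ d →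
      ∀ (r c : Int) (v : PySem.Set (List Char)) (s : PySem.Set (Int × Int))
        (rest : List (Int × Int)) (acc : Int), RelVS v s →
      ∃ s', RelVS (exploreF g d fuel r c v).2.1 s' ∧
        stackLoop g fuel ((r, c) :: rest) s acc =
          stackLoop g (exploreF g d fuel r c v).2.2 rest s' (acc + (exploreF g d fuel r c v).1) := by
  intro d
  induction d with
  | zero =>
    intro fuel hfd r c v s rest acc hrel
    have hf0 : fuel = 0 := Nat.le_zero.mp hfd
    subst hf0
    refine ⟨s, ?_, ?_⟩
    · rw [exF_d0]; exact hrel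
    · rw [exF_d0]
      simp [sl0]
  | succ d ih =>
    intro fuel hfd r c v s rest acc hrel
    cases fuel with
    | zero =>
      refine ⟨s, ?_, ?_⟩
      · rw [exF_f0]; exact hrel
      · rw [exF_f0]
        simp [sl0]
    | succ fl =>
      by_cases h1 : r < 0 ∨ (g.length : Int) - 1 < r
      · refine ⟨s, ?_, ?_⟩
        · rw [exF_exit g d fl r c v (Or.inl h1)]; exact hrel
        · rw [exF_exit g d fl r c v (Or.inl h1), slSkip g fl r c rest s acc (by omega)]
          simp
      · by_cases h2 : c < 0 ∨ ((g.headD []).length : Int) - 1 < c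
        · refine ⟨s, ?_, ?_⟩
          · rw [exF_exit g d fl r c v (Or.inr (Or.inl h2))]; exact hrel
          · rw [exF_exit g d fl r c v (Or.inr (Or.inl h2)), slSkip g fl r c rest s acc (by omega)]
            simp
        · have hr : 0 ≤ r := by omega
          have hc : 0 ≤ c := by omega
          by_cases h3 : PySem.List.pyGetD (PySem.List.pyGetD g r []) c "" = "W"
          · refine ⟨s, ?_, ?_⟩
            · rw [exF_exit g d fl r c v (Or.inr (Or.inr (Or.inl h3)))]; exact hrel
            · rw [exF_exit g d fl r c v (Or.inr (Or.inr (Or.inl h3))),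
                slSkip g fl r c rest s acc (by tauto)]
              simp
          · have hbr := pvContainsBridge v s r c hrel hr hc
            by_cases h4 : PySem.Set.contains v (keyA r c) = true
            · refine ⟨s, ?_, ?_⟩
              · rw [exF_exit g d fl r c v (Or.inr (Or.inr (Or.inr h4)))]; exact hrel
              · have hsc : PySem.Set.contains s (r, c) = true := hbr ▸ h4
                rw [exF_exit g d fl r c v (Or.inr (Or.inr (Or.inr h4))),
                  slSkip g fl r c rest s acc (fun hC => by rw [hsc] at hC; exact absurd hC.2.2.2.2.2 (by simp))]
                simp
            · have hvisit := exF_visit g d fl r c v h1 h2 h3 h4 rfl rfl rfl rfl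
              have hrel1 := pvRelAdd v s r c hrel hr hc
              have hsc : PySem.Set.contains s (r, c) = false := by
                rw [← hbr]
                exact Bool.not_eq_true (PySem.Set.contains v (keyA r c)) ▸ h4
              set v1 := PySem.Set.add v (keyA r c) with hv1
              set s1 := PySem.Set.add s (r, c) with hs1
              obtain ⟨s2, hrel2, heq1⟩ :=
                ih fl (by omega) (r+1) c v1 s1 ((r, c+1) :: (r-1, c) :: (r, c-1) :: rest) (acc+1) hrel1
              set o1 := exploreF g d fl (r+1) c v1 with ho1
              have hle1 : o1.2.2 ≤ fl := pvExploreFuelLe g d fl (r+1) c v1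
              obtain ⟨s3, hrel3, heq2⟩ :=
                ih o1.2.2 (by omega) r (c+1) o1.2.1 s2 ((r-1, c) :: (r, c-1) :: rest) (acc+1+o1.1) hrel2
              set o2 := exploreF g d o1.2.2 r (c+1) o1.2.1 with ho2
              have hle2 : o2.2.2 ≤ o1.2.2 := pvExploreFuelLe g d o1.2.2 r (c+1) o1.2.1
              obtain ⟨s4, hrel4, heq3⟩ :=
                ih o2.2.2 (by omega) (r-1) c o2.2.1 s3 ((r, c-1) :: rest) (acc+1+o1.1+o2.1) hrel3
              set o3 := exploreF g d o2.2.2 (r-1) c o2.2.1 with ho3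
              have hle3 : o3.2.2 ≤ o2.2.2 := pvExploreFuelLe g d o2.2.2 (r-1) c o2.2.1
              obtain ⟨s5, hrel5, heq4⟩ :=
                ih o3.2.2 (by omega) r (c-1) o3.2.1 s4 rest (acc+1+o1.1+o2.1+o3.1) hrel4
              set o4 := exploreF g d o3.2.2 r (c-1) o3.2.1 with ho4
              refine ⟨s5, ?_, ?_⟩
              · rw [hvisit]; exact hrel5
              · rw [slVisit g fl r c rest s acc (by refine ⟨hr, by omega, hc, by omega, h3, hsc⟩), ← hs1]
                rw [heq1, heq2, heq3, heq4, hvisit]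
                have harith : acc + 1 + o1.1 + o2.1 + o3.1 + o4.1 = acc + (1 + o1.1 + o2.1 + o3.1 + o4.1) := by ring
                rw [harith]

def InvAB (a : Int × PySem.Set (List Char) × Int) (b : Int × PySem.Set (Int × Int) × Int) : Prop :=
  a.1 = b.1 ∧ a.2.2 = b.2.2 ∧ RelVS a.2.1 b.2.1

lemma pvFoldInv {σ τ : Type} (P : σ → τ → Prop) (fA : σ → Int → σ) (fB : τ → Int → τ) :
    ∀ (l : List Int), (∀ x ∈ l, ∀ a b, P a b → P (fA a x) (fB b x)) →
      ∀ {a : σ} {b : τ}, P a b → P (l.foldl fA a) (l.foldl fB b) := by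
  intro l
  induction l with
  | nil => intro _ a b h; exact h
  | cons x xs ih =>
    intro hstep a b h
    exact ih (fun y hy => hstep y (List.mem_cons_of_mem _ hy)) (hstep x List.mem_cons_self a b h)

lemma pvCellStep (g : List (List String)) (r c : Int)
    (a : Int × PySem.Set (List Char) × Int) (b : Int × PySem.Set (Int × Int) × Int)
    (h : InvAB a b) :
    InvAB
      (let o := exploreF g (pvFuel g) (pvFuel g) r c a.2.1
       ((if o.1 ≠ 0 then a.1 + 1 else a.1), o.2.1, if o.1 > a.2.2 then o.1 else a.2.2))
      (let o := stackLoop g (pvFuel g) [(r, c)] b.2.1 0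
       ((if o.1 ≠ 0 then b.1 + 1 else b.1), o.2, if o.1 > b.2.2 then o.1 else b.2.2)) := by
  obtain ⟨hcount, hlarge, hrel⟩ := h
  obtain ⟨s', hrel', heq⟩ := pvSim g (pvFuel g) (pvFuel g) (le_refl _) r c a.2.1 b.2.1 [] 0 hrel
  rw [slNil] at heq
  refine ⟨?_, ?_, ?_⟩
  · simp only [heq, zero_add]
    rw [hcount]
  · simp only [heq, zero_add]
    rw [hlarge]
  · show RelVS (exploreF g (pvFuel g) (pvFuel g) r c a.2.1).2.1 (stackLoop g (pvFuel g) [(r, c)] b.2.1 0).2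
    rw [heq]
    exact hrel'

lemma pvMain (g : List (List String)) : islandCount g = islandCount_alt g := by
  have hinit : InvAB ((0 : Int), ([] : PySem.Set (List Char)), (0 : Int))
      ((0 : Int), ([] : PySem.Set (Int × Int)), (0 : Int)) :=
    ⟨rfl, rfl, ⟨fun p hp => absurd hp (List.not_mem_nil), rfl⟩⟩
  have key := pvFoldInv InvAB
    (fun st r => (PySem.List.pyRange 0 ((islandGrid.headD []).length : Int) 1).foldl (fun st c =>
        let o := exploreF g (pvFuel g) (pvFuel g) r c st.2.1
        ((if o.1 ≠ 0 then st.1 + 1 else st.1), o.2.1, if o.1 > st.2.2 then o.1 else st.2.2)) st)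
    (fun st r => (PySem.List.pyRange 0 ((islandGrid.headD []).length : Int) 1).foldl (fun st c =>
        let o := stackLoop g (pvFuel g) [(r, c)] st.2.1 0
        ((if o.1 ≠ 0 then st.1 + 1 else st.1), o.2, if o.1 > st.2.2 then o.1 else st.2.2)) st)
    (PySem.List.pyRange 0 (islandGrid.length : Int) 1)
    (fun r _ a b hab => pvFoldInv InvAB _ _ (PySem.List.pyRange 0 ((islandGrid.headD []).length : Int) 1)
        (fun c _ a' b' hab' => pvCellStep g r c a' b' hab') hab)
    hinit
  exact Prod.ext key.1 key.2.1

-- ===== VERDICT (by name: the statement is the Claim_ definition above) =====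
theorem islandCount_spec : Claim_equal_islandCount := by
  intro grid _ _
  show islandCount grid = islandCount_alt grid
  exact pvMain grid
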